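-- pv_equiv track=rewrite | github.com/joaquinOnSoft/BecasXCentroMadrid | schoolarshipxcenter/reader/DWRClientMadridCenterDetails.py | __extract_students_data
-- ===== SOURCE A (Python) =====
-- def __extract_students_data(params_array, data):
--     for key in params_array:
--         if "nombreSerie" in key:
--             series_name_ref = params_array[key]
--             series_name = params_array[series_name_ref]
--
--             index = int(series_name_ref.replace("s", ""))
--             # skip two positions
--             index += 2
--             init_index = index
--
--             while params_array["s" + str(index)] != "[]":
--                 index += 1
--
--             shift = index
--             index = init_index
--             i = 0
--
--             # Recover column titles
--             while params_array["s" + str(index)] != "[]":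
--                 field_name = series_name + " " + params_array["s" + str(index)]
--
--                 field_name = field_name.replace('"', '')
--                 field_name = field_name.replace("\\u00E1", "á")
--                 field_name = field_name.replace("\\u00F3", "ó")
--
--                 field_value = params_array["s" + str(shift) + "[" + str(i) + "]"]
--                 data[field_name] = params_array[field_value]
--
--                 index += 1
--                 i += 1
--
--     return data
-- ===== SOURCE B (Python) =====
-- # B: per series, one read-only scan collects the column titles into a list,
-- # then a single enumerate loop builds the labeled entries (A re-walks the
-- # index range a second time, recomputing every "s<i>" key while writing).
-- # Like A, B mutates `data` in place and returns it.
-- def __extract_students_data(params_array, data):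
--     for key in params_array:
--         if "nombreSerie" not in key:
--             continue
--         ref = params_array[key]
--         series_name = params_array[ref]
--         index = int(ref.replace("s", "")) + 2
--         titles = []
--         while True:
--             value = params_array["s" + str(index)]
--             if value == "[]":
--                 break
--             titles.append(value)
--             index += 1
--         shift = index
--         for i, raw in enumerate(titles):
--             field_name = (series_name + " " + raw).replace('"', '') \
--                 .replace("\\u00E1", "á").replace("\\u00F3", "ó")
--             field_value = params_array["s" + str(shift) + "[" + str(i) + "]"]
--             data[field_name] = params_array[field_value]
--     return data
-- ===== Notes on version B (the rewrite author's own statement) =====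
-- stated objective: simpler
-- what changed: A finds the '[]' terminator with one while loop and then re-walks the same index range with a second while loop that rebuilds each 's<i>' key while writing; B does a single read-only scan that collects the titles into a list and then writes the entries with one enumerate loop over that list.
import Mathlib
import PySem

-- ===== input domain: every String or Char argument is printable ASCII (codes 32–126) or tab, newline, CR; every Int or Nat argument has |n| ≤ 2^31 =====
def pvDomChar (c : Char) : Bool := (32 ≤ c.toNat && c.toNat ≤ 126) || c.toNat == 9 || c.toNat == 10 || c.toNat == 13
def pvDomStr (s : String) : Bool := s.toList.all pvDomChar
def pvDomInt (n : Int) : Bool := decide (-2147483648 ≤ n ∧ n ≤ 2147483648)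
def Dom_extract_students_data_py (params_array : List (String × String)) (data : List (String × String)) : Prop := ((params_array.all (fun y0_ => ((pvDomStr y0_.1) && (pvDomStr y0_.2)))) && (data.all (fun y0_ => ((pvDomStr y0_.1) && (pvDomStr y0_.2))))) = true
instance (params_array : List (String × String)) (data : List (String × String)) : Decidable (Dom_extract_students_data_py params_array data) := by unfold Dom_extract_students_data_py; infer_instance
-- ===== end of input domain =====

-- B replaces A's find-the-terminator-then-rescan pair of while loops by one
-- read-only scan that collects the titles into a list followed by an
-- enumerate fold that writes the entries; both mutate `data` identically
-- under Pre_ and the equivalence proved is about the returned mapping.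

-- ===== PORT A =====
-- first while loop of A: advance index until params["s"+str(index)] == "[]".
-- A missing key raises KeyError in Python (excluded by Pre_); the default
-- "[]" stops the loop there, and fuel = len(params)+1 always suffices under
-- Pre_ since each step consumes a distinct present key.
def pvA_scan (params : PySem.Dict String String) (idx : Int) : Nat → Int
  | 0 => idx
  | f + 1 =>
    if params.getD ("s" ++ PySem.Int.toStr idx) "[]" ≠ "[]" then
      pvA_scan params (idx + 1) f
    else idx

-- second while loop of A: rebuild each field name and write into data.
-- missing keys (KeyError in Python) are excluded by Pre_; defaults "" / "[]".
def pvA_write (params : PySem.Dict String String) (series_name : String)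
    (shift : Int) (idx i : Int) (d : PySem.Dict String String) :
    Nat → PySem.Dict String String
  | 0 => d
  | f + 1 =>
    let v := params.getD ("s" ++ PySem.Int.toStr idx) "[]"
    if v ≠ "[]" then
      let field_name := PySem.Str.replace (PySem.Str.replace
        (PySem.Str.replace (series_name ++ " " ++ v) "\"" "") "\\u00E1" "á")
        "\\u00F3" "ó"
      let field_value :=
        params.getD ("s" ++ PySem.Int.toStr shift ++ "[" ++ PySem.Int.toStr i ++ "]") ""
      pvA_write params series_name shift (idx + 1) (i + 1)
        (d.insert field_name (params.getD field_value "")) f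
    else d

-- body of A's `for key in params_array` loop (int() ValueError excluded by Pre_)
def pvA_step (pa : List (String × String)) (d : PySem.Dict String String)
    (kv : String × String) : PySem.Dict String String :=
  if PySem.Str.isIn "nombreSerie" kv.1 then
    let params := PySem.Dict.mk pa
    let series_name_ref := params.getD kv.1 ""
    let series_name := params.getD series_name_ref ""
    match PySem.Int.ofStr? (PySem.Str.replace series_name_ref "s" "") with
    | none => d
    | some m =>
      let init_index := m + 2
      let shift := pvA_scan params init_index (pa.length + 1)
      pvA_write params series_name shift init_index 0 d (pa.length + 1)
  else d

def extract_students_data_py (params_array : List (String × String))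
    (data : List (String × String)) : List (String × String) :=
  (params_array.foldl (pvA_step params_array) (PySem.Dict.mk data)).items

-- ===== PORT B =====
-- B's single scan: collect the raw titles and return them with the final
-- index (shift); read-only, same fuel and same KeyError exclusion as A.
def pvB_collect (params : PySem.Dict String String) (idx : Int) :
    Nat → List String × Int
  | 0 => ([], idx)
  | f + 1 =>
    let v := params.getD ("s" ++ PySem.Int.toStr idx) "[]"
    if v ≠ "[]" then
      let c := pvB_collect params (idx + 1) f
      (v :: c.1, c.2)
    else ([], idx)

def pvB_field (series_name raw : String) : String :=
  PySem.Str.replace (PySem.Str.replace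
    (PySem.Str.replace (series_name ++ " " ++ raw) "\"" "") "\\u00E1" "á")
    "\\u00F3" "ó"

-- body of B's `for i, raw in enumerate(titles)` loop
def pvB_fillStep (params : PySem.Dict String String) (series_name : String)
    (shift : Int) (d : PySem.Dict String String) (p : Int × String) :
    PySem.Dict String String :=
  let field_value :=
    params.getD ("s" ++ PySem.Int.toStr shift ++ "[" ++ PySem.Int.toStr p.1 ++ "]") ""
  d.insert (pvB_field series_name p.2) (params.getD field_value "")

def pvB_step (pa : List (String × String)) (d : PySem.Dict String String)
    (kv : String × String) : PySem.Dict String String :=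
  if PySem.Str.isIn "nombreSerie" kv.1 then
    let params := PySem.Dict.mk pa
    let ref := params.getD kv.1 ""
    let series_name := params.getD ref ""
    match PySem.Int.ofStr? (PySem.Str.replace ref "s" "") with
    | none => d
    | some m =>
      let c := pvB_collect params (m + 2) (pa.length + 1)
      (PySem.List.enumerate c.1).foldl (pvB_fillStep params series_name c.2) d
  else d

def extract_students_data_py_alt (params_array : List (String × String))
    (data : List (String × String)) : List (String × String) :=
  (params_array.foldl (pvB_step params_array) (PySem.Dict.mk data)).items

-- ===== PRECONDITION & SPEC =====
def pvLook (params : List (String × String)) (k : String) : Option String :=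
  (PySem.Dict.mk params).get? k

-- all dict lookups A performs for one matching key succeed, int() parses,
-- and the "[]" terminator is reached (within the |params| distinct keys)
def pvPreKey (params : List (String × String)) (key : String) : Bool :=
  match pvLook params key with
  | none => false
  | some ref =>
    match pvLook params ref, PySem.Int.ofStr? (PySem.Str.replace ref "s" "") with
    | some _, some m =>
      (List.range (params.length + 1)).any fun n =>
        (pvLook params ("s" ++ PySem.Int.toStr (m + 2 + n)) == some "[]")
        && ((List.range n).all fun t =>
              match pvLook params ("s" ++ PySem.Int.toStr (m + 2 + t)) with
              | some v => v != "[]"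
              | none => false)
        && ((List.range n).all fun t =>
              match pvLook params
                  ("s" ++ PySem.Int.toStr (m + 2 + n) ++ "[" ++ PySem.Int.toStr t ++ "]") with
              | some fv => (pvLook params fv).isSome
              | none => false)
    | _, _ => false

-- Pre_ excludes (a) inputs on which Python A raises KeyError/ValueError, and
-- (b) lists with duplicate keys, which a Python dict cannot represent (the
-- dict built from them collapses to the last value, so the association-list
-- convention has no faithful reading there).
def Pre_extract_students_data_py (params_array : List (String × String))
    (data : List (String × String)) : Prop :=
  (params_array.map Prod.fst).Nodup ∧ (data.map Prod.fst).Nodup ∧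
  (params_array.all fun kv =>
    !(PySem.Str.isIn "nombreSerie" kv.1) || pvPreKey params_array kv.1) = true

instance (params_array : List (String × String)) (data : List (String × String)) :
    Decidable (Pre_extract_students_data_py params_array data) := by
  unfold Pre_extract_students_data_py; infer_instance

def pvWitness_extract_students_data_py :
    (List (String × String)) × (List (String × String)) :=
  ([("nombreSerie1", "s1"), ("s1", "Beca"), ("s3", "\"Centro\""), ("s4", "[]"),
    ("s4[0]", "s9"), ("s9", "100")], [("pre", "x")])

def Spec_extract_students_data_py (params_array : List (String × String)) (data : List (String × String)) (out : List (String × String)) : Prop := out = extract_students_data_py_alt params_array data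
instance (params_array : List (String × String)) (data : List (String × String)) (out : List (String × String)) : Decidable (Spec_extract_students_data_py params_array data out) := by unfold Spec_extract_students_data_py; infer_instance

-- ===== CLAIM (what is proved, stated in full; the proofs are below) =====
def Claim_equal_extract_students_data_py : Prop := ∀ (params_array : List (String × String)) (data : List (String × String)), Dom_extract_students_data_py params_array data → Pre_extract_students_data_py params_array data → Spec_extract_students_data_py params_array data (extract_students_data_py params_array data)

-- ===== LEMMAS AND PROOFS =====
theorem pv_scan_eq (params : PySem.Dict String String) :
    ∀ (fuel : Nat) (idx : Int),
      pvA_scan params idx fuel = (pvB_collect params idx fuel).2 := by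
  intro fuel
  induction fuel with
  | zero => intro idx; rfl
  | succ f ih =>
    intro idx
    simp only [pvA_scan, pvB_collect]
    by_cases h : params.getD ("s" ++ PySem.Int.toStr idx) "[]" ≠ "[]"
    · rw [if_pos h, if_pos h]; exact ih (idx + 1)
    · rw [if_neg h, if_neg h]

theorem pv_write_eq (params : PySem.Dict String String) (sn : String) (sh : Int) :
    ∀ (fuel : Nat) (idx i : Int) (d : PySem.Dict String String),
      pvA_write params sn sh idx i d fuel =
        (PySem.List.enumerate (pvB_collect params idx fuel).1 i).foldl
          (pvB_fillStep params sn sh) d := by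
  intro fuel
  induction fuel with
  | zero =>
    intro idx i d
    simp [pvA_write, pvB_collect, PySem.List.enumerate_nil]
  | succ f ih =>
    intro idx i d
    simp only [pvA_write, pvB_collect]
    by_cases h : params.getD ("s" ++ PySem.Int.toStr idx) "[]" ≠ "[]"
    · rw [if_pos h, if_pos h, ih]
      simp only [PySem.List.enumerate_cons, List.foldl_cons, pvB_fillStep, pvB_field]
    · rw [if_neg h, if_neg h]
      simp [PySem.List.enumerate_nil]

theorem pv_step_eq (pa : List (String × String)) (d : PySem.Dict String String)
    (kv : String × String) : pvA_step pa d kv = pvB_step pa d kv := by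
  unfold pvA_step pvB_step
  by_cases h : PySem.Str.isIn "nombreSerie" kv.1 = true
  · rw [if_pos h, if_pos h]
    simp only []
    cases hm : PySem.Int.ofStr?
        (PySem.Str.replace ((PySem.Dict.mk pa).getD kv.1 "") "s" "") with
    | none => rfl
    | some m => simp only [pv_write_eq, pv_scan_eq]
  · rw [if_neg h, if_neg h]

-- ===== VERDICT (by name: the statement is the Claim_ definition above) =====
theorem extract_students_data_py_spec : Claim_equal_extract_students_data_py := by
  intro params_array data _ _
  unfold Spec_extract_students_data_py
  unfold extract_students_data_py extract_students_data_py_alt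
  have hf : pvA_step params_array = pvB_step params_array :=
    funext fun d => funext fun kv => pv_step_eq params_array d kv
  rw [hf]
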